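-- pv_equiv track=rewrite | github.com/Boom-Ba/Greedy | Flip/BulbsSwitch.py | miniFlipstoSetAllElements
-- ===== SOURCE A (Python) =====
-- def miniFlipstoSetAllElements(arr):
--   count=0
--   while True:
--     if 0 not in arr:
--       break
--     count+=1
--     start=-1
--     i=0
--     while i<len(arr):
--       if arr[i]==0:
--         #start flip
--         start=i
--         break
--       else:
--         i+=1
--     while start<len(arr):
--       arr[start]=1-arr[start]
--       start+=1
--   return count
-- ===== SOURCE B (Python) =====
-- def miniFlipstoSetAllElements(arr):
--     count = 0
--     for x in arr:
--         if x == count % 2: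
--             count += 1
--     return count
-- ===== Notes on version B (the rewrite author's own statement) =====
-- stated objective: alternative
-- what changed: Replaces A's repeated find-first-zero-and-flip-suffix loop (which also mutates the input) by a single left-to-right pass tracking the flip count, incrementing when the element equals the current flip parity.
import Mathlib
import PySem

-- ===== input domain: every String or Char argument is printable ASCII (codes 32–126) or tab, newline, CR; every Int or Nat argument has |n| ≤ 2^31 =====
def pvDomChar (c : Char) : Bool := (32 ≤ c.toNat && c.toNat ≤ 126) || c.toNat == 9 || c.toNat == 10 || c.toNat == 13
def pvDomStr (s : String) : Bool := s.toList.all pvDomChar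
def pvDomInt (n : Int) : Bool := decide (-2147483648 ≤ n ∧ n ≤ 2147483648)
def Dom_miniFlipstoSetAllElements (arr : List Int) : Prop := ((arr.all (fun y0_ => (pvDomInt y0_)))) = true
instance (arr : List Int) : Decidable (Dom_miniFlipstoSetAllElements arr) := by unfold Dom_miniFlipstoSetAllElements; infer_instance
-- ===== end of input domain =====

-- B replaces A's repeated find-first-zero/flip-suffix passes by a single pass tracking the flip
-- count; A mutates its argument in place, the equivalence proved is about the RETURN value only.

-- ===== PORT A =====
-- inner flip loop: while start < len(arr): arr[start] = 1 - arr[start]; start += 1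
def pvFlipSuffix : List Int → List Int
  | [] => []
  | x :: xs => (1 - x) :: pvFlipSuffix xs

theorem pvFlipSuffix_length (l : List Int) : (pvFlipSuffix l).length = l.length := by
  induction l with
  | nil => rfl
  | cons x xs ih => simp [pvFlipSuffix, ih]

theorem pvALoop_measure (arr : List Int) (h : (0 : Int) ∈ arr) :
    arr.length -
        ((arr.take (arr.findIdx (fun x => x == 0)) ++
            pvFlipSuffix (arr.drop (arr.findIdx (fun x => x == 0)))).findIdx (fun x => x == 0)) <
      arr.length - arr.findIdx (fun x => x == 0) := by
  set i := arr.findIdx (fun x => x == 0) with hi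
  have hfound : i < arr.length := List.findIdx_lt_length.2 ⟨0, h, by simp⟩
  have hdrop : arr.drop i ≠ [] := by
    intro hnil; rw [List.drop_eq_nil_iff] at hnil; omega
  obtain ⟨y, ys, hys⟩ := List.exists_cons_of_ne_nil hdrop
  have hy : y = 0 := by
    have hget : arr[i] = y := by
      have h0 : (arr.drop i)[0]'(by simp [hys]) = y := by simp [hys]
      rw [List.getElem_drop] at h0
      simpa using h0
    have hfi := List.findIdx_getElem (p := fun x => (x == 0)) (w := hfound)
    have hfi' : (arr[i]'hfound == 0) = true := hfi
    rw [hget] at hfi'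
    simpa using hfi'
  -- new first-zero index: the taken prefix has no zero, and position i holds 1
  have hpre : ∀ x ∈ arr.take i, ¬ (x == 0) = true := by
    intro x hx
    obtain ⟨j, hj, hjx⟩ := List.getElem_of_mem hx
    have hjlt : j < i := by have := hj; simp [List.length_take] at this; omega
    have hnz := List.not_of_lt_findIdx (p := fun x => (x == 0)) (hi ▸ hjlt)
    have hnz' : (arr[j]'(by omega) == 0) = false := hnz
    simp only [List.getElem_take] at hjx
    rw [hjx] at hnz'
    simp at hnz'
    simpa using hnz'
  have happ : ((arr.take i ++ pvFlipSuffix (arr.drop i)).findIdx (fun x => x == 0)) =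
      (arr.take i).length + ((pvFlipSuffix (arr.drop i)).findIdx (fun x => x == 0)) := by
    rw [List.findIdx_append]
    have : (arr.take i).findIdx (fun x => x == 0) = (arr.take i).length :=
      List.findIdx_eq_length.2 (by intro x hx; simpa using hpre x hx)
    simp [this]
    omega
  have htail : (pvFlipSuffix (arr.drop i)).findIdx (fun x => x == 0) ≥ 1 := by
    rw [hys]
    simp [pvFlipSuffix, List.findIdx_cons, hy]
  have hlen : (arr.take i).length = i := by simp; omega
  omega

def pvALoop (arr : List Int) (count : Int) : Int :=
  if h : (0 : Int) ∈ arr then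
    -- middle while loop: scan for the first index holding 0 (start)
    let start := arr.findIdx (fun x => x == 0)
    pvALoop (arr.take start ++ pvFlipSuffix (arr.drop start)) (count + 1)
  else count
termination_by arr.length - arr.findIdx (fun x => x == 0)
decreasing_by
  have hlen : (arr.take (arr.findIdx (fun x => x == 0)) ++
      pvFlipSuffix (arr.drop (arr.findIdx (fun x => x == 0)))).length = arr.length := by
    simp [pvFlipSuffix_length]; omega
  rw [hlen]; exact pvALoop_measure arr h

def miniFlipstoSetAllElements (arr : List Int) : Int := pvALoop arr 0

-- ===== PORT B =====
def pvStep (count : Int) (x : Int) : Int :=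
  if x == PySem.Int.mod count 2 then count + 1 else count

def miniFlipstoSetAllElements_alt (arr : List Int) : Int := arr.foldl pvStep 0

-- ===== PRECONDITION & SPEC =====
def Spec_miniFlipstoSetAllElements (arr : List Int) (out : Int) : Prop := out = miniFlipstoSetAllElements_alt arr
instance (arr : List Int) (out : Int) : Decidable (Spec_miniFlipstoSetAllElements arr out) := by unfold Spec_miniFlipstoSetAllElements; infer_instance

-- ===== CLAIM (what is proved, stated in full; the proofs are below) =====
def Claim_equal_miniFlipstoSetAllElements : Prop := ∀ (arr : List Int), Dom_miniFlipstoSetAllElements arr → Spec_miniFlipstoSetAllElements arr (miniFlipstoSetAllElements arr)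

-- ===== LEMMAS AND PROOFS =====

theorem pvMod_two (c : Int) : PySem.Int.mod c 2 = c % 2 :=
  PySem.Int.mod_eq_emod_of_pos (by norm_num)

-- a list with no zeros is skipped by the scan when the count is even
theorem pvSkip (l : List Int) (c : Int) (hc : c % 2 = 0)
    (hl : ∀ x ∈ l, x ≠ 0) : l.foldl pvStep c = c := by
  induction l with
  | nil => rfl
  | cons x xs ih =>
    have hx : x ≠ 0 := hl x (by simp)
    have : pvStep c x = c := by
      simp [pvStep, hc]
      omega
    rw [List.foldl_cons, this]
    exact ih (fun x hx => hl x (by simp [hx]))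

-- flipping the tail is the same as bumping the running count by one
theorem pvFlip (l : List Int) (c : Int) :
    l.foldl pvStep (c + 1) = (pvFlipSuffix l).foldl pvStep c + 1 := by
  induction l generalizing c with
  | nil => simp [pvFlipSuffix]
  | cons x xs ih =>
    simp only [pvFlipSuffix, List.foldl_cons, pvStep, pvMod_two, beq_iff_eq]
    by_cases h : x = (c + 1) % 2
    · rw [if_pos h, if_pos (by omega)]
      exact ih (c + 1)
    · rw [if_neg h, if_neg (by omega)]
      exact ih c

theorem pvLoop_eq (arr : List Int) (c : Int) :
    pvALoop arr c = c + arr.foldl pvStep 0 := by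
  induction arr, c using pvALoop.induct with
  | case2 arr c h =>
    rw [pvALoop]
    have hl : ∀ x ∈ arr, x ≠ 0 := by
      intro x hx hx0; exact h (hx0 ▸ hx)
    simp [h, pvSkip arr 0 (by norm_num) hl]
  | case1 arr c h start ih =>
    set i := arr.findIdx (fun x => x == 0) with hi
    have hfound : i < arr.length := List.findIdx_lt_length.2 ⟨0, h, by simp⟩
    have hdrop : arr.drop i ≠ [] := by
      intro hnil; rw [List.drop_eq_nil_iff] at hnil; omega
    obtain ⟨y, ys, hys⟩ := List.exists_cons_of_ne_nil hdrop
    have hy : y = 0 := by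
      have hget : arr[i] = y := by
        have h0 : (arr.drop i)[0]'(by simp [hys]) = y := by simp [hys]
        rw [List.getElem_drop] at h0
        simpa using h0
      have hfi := List.findIdx_getElem (p := fun x => (x == 0)) (w := hfound)
      have hfi' : (arr[i]'hfound == 0) = true := hfi
      rw [hget] at hfi'
      simpa using hfi'
    have hpre : ∀ x ∈ arr.take i, x ≠ 0 := by
      intro x hx hx0
      obtain ⟨j, hj, hjx⟩ := List.getElem_of_mem hx
      have hjlt : j < i := by have := hj; simp [List.length_take] at this; omega
      have hnz := List.not_of_lt_findIdx (p := fun x => (x == 0)) (hi ▸ hjlt)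
      have hnz' : (arr[j]'(by omega) == 0) = false := hnz
      simp only [List.getElem_take] at hjx
      rw [hjx] at hnz'
      simp [hx0] at hnz'
    have ih' : pvALoop (arr.take i ++ pvFlipSuffix (arr.drop i)) (c + 1)
        = c + 1 + (arr.take i ++ pvFlipSuffix (arr.drop i)).foldl pvStep 0 := ih
    rw [pvALoop, dif_pos h]
    show pvALoop (arr.take i ++ pvFlipSuffix (arr.drop i)) (c + 1) = c + arr.foldl pvStep 0
    rw [ih']
    -- both counts: decompose arr = take i ++ 0 :: ys
    have harr : arr = arr.take i ++ y :: ys := by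
      conv_lhs => rw [← List.take_append_drop i arr, hys]
    have h1 : arr.foldl pvStep 0 = (pvFlipSuffix ys).foldl pvStep 0 + 1 := by
      conv_lhs => rw [harr]
      rw [List.foldl_append, pvSkip _ 0 (by norm_num) hpre, List.foldl_cons]
      have : pvStep 0 y = 1 := by simp [pvStep, hy, PySem.Int.mod]
      rw [this]
      exact pvFlip ys 0
    have h2 : (arr.take i ++ pvFlipSuffix (arr.drop i)).foldl pvStep 0 =
        (pvFlipSuffix ys).foldl pvStep 0 := by
      rw [hys]
      simp only [pvFlipSuffix, hy]
      rw [List.foldl_append, pvSkip _ 0 (by norm_num) hpre, List.foldl_cons]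
      have : pvStep 0 (1 - 0) = 0 := by simp [pvStep, PySem.Int.mod]
      rw [this]
    rw [h2, h1]
    ring

-- ===== VERDICT (by name: the statement is the Claim_ definition above) =====
theorem miniFlipstoSetAllElements_spec : Claim_equal_miniFlipstoSetAllElements := by
  intro arr _
  unfold Spec_miniFlipstoSetAllElements miniFlipstoSetAllElements miniFlipstoSetAllElements_alt
  simpa using pvLoop_eq arr 0
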